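-- pv_equiv track=rewrite | github.com/yangzq12/contract_abstract | slither/tools/contract_abstract/contract/contract_walker.py | get_pattern_mode
-- ===== SOURCE A (Python) =====
-- def get_pattern_mode(patterns):
--     pattern_mode = 0 # 记录patter mode， 0表示未识别，1就是连续，2就是隔两个取第一个，3就是隔两个取第二个
--     # 识别连续的pattern
--     n = len(patterns[1]) # 每连续n个是一个基本元素
--     if n > 0:
--         for pattern in patterns:
--             if len(pattern[1]) == n:
--                 pattern_mode = 1
--             else:
--                 pattern_mode = 0
--                 break
--     if pattern_mode == 1:
--         return pattern_mode
--     # 识别隔两个取第一个的pattern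
--     for pattern in patterns:
--         if len(pattern[1]) == 1:
--             if pattern[1][0] == pattern[0]*2: #识别0， 2， 4，6， 8
--                 pattern_mode = 2
--             else:
--                 pattern_mode = 0
--                 break
--     if pattern_mode == 2:
--         return pattern_mode
--     # 识别隔两个取第二个的pattern
--     for pattern in patterns:
--         if len(pattern[1]) == 1:
--             if pattern[1][0] == pattern[0]*2+1: #识别1， 3， 5， 7， 9
--                 pattern_mode = 3
--             else:
--                 pattern_mode = 0
--                 break
--     return pattern_mode
-- ===== SOURCE B (Python) =====
-- def get_pattern_mode(patterns):
--     # Single pass: accumulate all four facts at once, then classify.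
--     n = len(patterns[1])
--     all_len = n > 0
--     any_one = False
--     all_first = True
--     all_second = True
--     for p in patterns:
--         seq = p[1]
--         if len(seq) != n:
--             all_len = False
--         if len(seq) == 1:
--             any_one = True
--             v = seq[0]
--             all_first = all_first and v == p[0] * 2
--             all_second = all_second and v == p[0] * 2 + 1
--     if all_len:
--         return 1
--     if any_one and all_first:
--         return 2
--     if any_one and all_second:
--         return 3
--     return 0
-- ===== Notes on version B (the rewrite author's own statement) =====
-- stated objective: alternative
-- what changed: Replaces A's three staged break-driven loops (one per candidate mode) with a single pass that accumulates four boolean facts (all-lengths-equal-n, any-length-1, all-first-slot, all-second-slot) and classifies from them afterwards.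
import Mathlib
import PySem

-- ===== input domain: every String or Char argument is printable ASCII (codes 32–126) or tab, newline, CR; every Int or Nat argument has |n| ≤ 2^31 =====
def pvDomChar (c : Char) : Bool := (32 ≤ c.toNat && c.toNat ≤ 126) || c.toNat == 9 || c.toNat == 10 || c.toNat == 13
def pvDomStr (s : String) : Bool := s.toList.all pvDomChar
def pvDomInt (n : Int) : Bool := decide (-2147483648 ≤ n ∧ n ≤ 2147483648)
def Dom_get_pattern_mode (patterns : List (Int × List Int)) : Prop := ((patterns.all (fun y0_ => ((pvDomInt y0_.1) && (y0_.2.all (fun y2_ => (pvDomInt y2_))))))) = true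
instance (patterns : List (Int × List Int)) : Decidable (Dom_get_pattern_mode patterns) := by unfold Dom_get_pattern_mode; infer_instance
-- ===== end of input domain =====

-- B replaces A's three staged break-driven loops by a single pass accumulating four
-- boolean facts and classifying afterwards (objective: alternative; same asymptotic cost).

-- ===== PORT A =====
-- first loop: sets mode to 1 while lengths equal n, breaks to 0 otherwise
def loopA1 (n : Int) : List (Int × List Int) → Int → Int
  | [], m => m
  | p :: rest, _m => if (p.2.length : Int) = n then loopA1 n rest 1 else 0

-- second loop: for length-1 patterns, checks p[1][0] == p[0]*2, mode 2 / break 0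
def loopA2 : List (Int × List Int) → Int → Int
  | [], m => m
  | p :: rest, m =>
    if p.2.length = 1 then
      (if p.2.headI = p.1 * 2 then loopA2 rest 2 else 0)
    else loopA2 rest m

-- third loop: for length-1 patterns, checks p[1][0] == p[0]*2+1, mode 3 / break 0
def loopA3 : List (Int × List Int) → Int → Int
  | [], m => m
  | p :: rest, m =>
    if p.2.length = 1 then
      (if p.2.headI = p.1 * 2 + 1 then loopA3 rest 3 else 0)
    else loopA3 rest m

def get_pattern_mode (patterns : List (Int × List Int)) : Int :=
  match PySem.List.pyGet? patterns 1 with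
  | none => 0  -- IndexError on patterns[1]; excluded by Pre_
  | some _ =>
    let n : Int := 2  -- len(patterns[1]) : length of a 2-tuple is 2
    let m1 := if n > 0 then loopA1 n patterns 0 else 0
    if m1 = 1 then m1
    else
      let m2 := loopA2 patterns m1
      if m2 = 2 then m2
      else loopA3 patterns m2

-- ===== PORT B =====
-- single-pass step: state = (all_len, any_one, all_first, all_second)
def stepB (n : Int) (st : Bool × Bool × Bool × Bool) (p : Int × List Int) : Bool × Bool × Bool × Bool :=
  let allLen := if (p.2.length : Int) ≠ n then false else st.1
  if p.2.length = 1 then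
    (allLen, true, st.2.2.1 && (p.2.headI == p.1 * 2), st.2.2.2 && (p.2.headI == p.1 * 2 + 1))
  else
    (allLen, st.2.1, st.2.2.1, st.2.2.2)

def get_pattern_mode_alt (patterns : List (Int × List Int)) : Int :=
  match PySem.List.pyGet? patterns 1 with
  | none => 0  -- IndexError on patterns[1]; excluded by Pre_
  | some _ =>
    let n : Int := 2  -- len(patterns[1]), a 2-tuple
    let st := patterns.foldl (stepB n) (decide (n > 0), false, true, true)
    if st.1 then 1
    else if st.2.1 && st.2.2.1 then 2
    else if st.2.1 && st.2.2.2 then 3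
    else 0

-- ===== PRECONDITION & SPEC =====
-- A evaluates patterns[1] and raises IndexError when patterns has fewer than 2 elements; Pre_ excludes exactly those inputs (B raises there too).
def Pre_get_pattern_mode (patterns : List (Int × List Int)) : Prop := 2 ≤ patterns.length
instance (patterns : List (Int × List Int)) : Decidable (Pre_get_pattern_mode patterns) := by unfold Pre_get_pattern_mode; infer_instance
def pvWitness_get_pattern_mode : (List (Int × List Int)) := [(0, [0]), (1, [2])]

def Spec_get_pattern_mode (patterns : List (Int × List Int)) (out : Int) : Prop := out = get_pattern_mode_alt patterns
instance (patterns : List (Int × List Int)) (out : Int) : Decidable (Spec_get_pattern_mode patterns out) := by unfold Spec_get_pattern_mode; infer_instance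

-- ===== CLAIM =====
def Claim_equal_get_pattern_mode : Prop := ∀ (patterns : List (Int × List Int)), Dom_get_pattern_mode patterns → Pre_get_pattern_mode patterns → Spec_get_pattern_mode patterns (get_pattern_mode patterns)

-- ===== LEMMAS AND PROOFS =====

lemma loopA1_eq (n : Int) (l : List (Int × List Int)) (m : Int) (h : l ≠ []) :
    loopA1 n l m = if l.all (fun p => (p.2.length : Int) == n) then 1 else 0 := by
  induction l generalizing m with
  | nil => exact absurd rfl h
  | cons p rest ih =>
    by_cases hp : (p.2.length : Int) = n
    · have hstep : loopA1 n (p :: rest) m = loopA1 n rest 1 := by simp [loopA1, hp]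
      rw [hstep]
      cases rest with
      | nil => simp [loopA1, hp]
      | cons q t =>
        rw [ih 1 (by simp)]
        simp only [List.all_cons]
        simp only [show ((p.2.length : Int) == n) = true from by simp [hp], Bool.true_and]
        rfl
    · simp [loopA1, hp]

lemma loopA2_eq (l : List (Int × List Int)) (m : Int) :
    loopA2 l m =
      (if (l.filter (fun p => p.2.length == 1)).isEmpty then m
       else if (l.filter (fun p => p.2.length == 1)).all (fun p => p.2.headI == p.1 * 2) then 2 else 0) := by
  induction l generalizing m with
  | nil => simp [loopA2]
  | cons p rest ih =>
    by_cases hp : p.2.length = 1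
    · by_cases hq : p.2.headI = p.1 * 2
      · have hstep : loopA2 (p :: rest) m = loopA2 rest 2 := by simp [loopA2, hp, hq]
        rw [hstep, ih 2]
        by_cases he : (rest.filter (fun p => p.2.length == 1)).isEmpty
        · have hnil : rest.filter (fun p => p.2.length == 1) = [] := List.isEmpty_iff.mp he
          simp [hp, hq, hnil]
        · have hcond : List.filter (fun p => p.2.length == 1) (p :: rest)
              = p :: List.filter (fun p => p.2.length == 1) rest := by
            simp [hp]
          rw [hcond]
          simp only [List.all_cons]
          simp only [show (p.2.headI == p.1 * 2) = true from by simp [hq], Bool.true_and]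
          simp [he]
      · have hstep : loopA2 (p :: rest) m = 0 := by simp [loopA2, hp, hq]
        rw [hstep]
        simp [hp, hq]
    · have hstep : loopA2 (p :: rest) m = loopA2 rest m := by simp [loopA2, hp]
      have hfil : List.filter (fun p => p.2.length == 1) (p :: rest)
          = List.filter (fun p => p.2.length == 1) rest := by simp [hp]
      rw [hstep, ih m, hfil]

lemma loopA3_eq (l : List (Int × List Int)) (m : Int) :
    loopA3 l m =
      (if (l.filter (fun p => p.2.length == 1)).isEmpty then m
       else if (l.filter (fun p => p.2.length == 1)).all (fun p => p.2.headI == p.1 * 2 + 1) then 3 else 0) := by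
  induction l generalizing m with
  | nil => simp [loopA3]
  | cons p rest ih =>
    by_cases hp : p.2.length = 1
    · by_cases hq : p.2.headI = p.1 * 2 + 1
      · have hstep : loopA3 (p :: rest) m = loopA3 rest 3 := by simp [loopA3, hp, hq]
        rw [hstep, ih 3]
        by_cases he : (rest.filter (fun p => p.2.length == 1)).isEmpty
        · have hnil : rest.filter (fun p => p.2.length == 1) = [] := List.isEmpty_iff.mp he
          simp [hp, hq, hnil]
        · have hcond : List.filter (fun p => p.2.length == 1) (p :: rest)
              = p :: List.filter (fun p => p.2.length == 1) rest := by
            simp [hp]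
          rw [hcond]
          simp only [List.all_cons]
          simp only [show (p.2.headI == p.1 * 2 + 1) = true from by simp [hq], Bool.true_and]
          simp [he]
      · have hstep : loopA3 (p :: rest) m = 0 := by simp [loopA3, hp, hq]
        rw [hstep]
        simp [hp, hq]
    · have hstep : loopA3 (p :: rest) m = loopA3 rest m := by simp [loopA3, hp]
      have hfil : List.filter (fun p => p.2.length == 1) (p :: rest)
          = List.filter (fun p => p.2.length == 1) rest := by simp [hp]
      rw [hstep, ih m, hfil]

-- characterisation of B's single-pass fold
lemma foldB_eq (n : Int) (l : List (Int × List Int)) (s : Bool × Bool × Bool × Bool) :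
    l.foldl (stepB n) s =
      (s.1 && l.all (fun p => (p.2.length : Int) == n),
       s.2.1 || l.any (fun p => p.2.length == 1),
       s.2.2.1 && (l.filter (fun p => p.2.length == 1)).all (fun p => p.2.headI == p.1 * 2),
       s.2.2.2 && (l.filter (fun p => p.2.length == 1)).all (fun p => p.2.headI == p.1 * 2 + 1)) := by
  induction l generalizing s with
  | nil => simp
  | cons p rest ih =>
    rw [List.foldl_cons, ih]
    by_cases hp : p.2.length = 1
    · by_cases hn : (p.2.length : Int) = n <;>
        simp [stepB, hp, hn, Bool.and_assoc, Bool.and_left_comm, beq_eq_decide]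
    · have hfalse : (p.2.length == 1) = false := by simp [hp]
      by_cases hn : (p.2.length : Int) = n <;>
        simp [stepB, hp, hn, hfalse, Bool.and_assoc, Bool.or_assoc, Bool.and_left_comm, beq_eq_decide]

lemma any_eq_not_isEmpty_filter (l : List (Int × List Int)) (q : Int × List Int → Bool) :
    l.any q = !(l.filter q).isEmpty := by
  induction l with
  | nil => simp
  | cons p rest ih => by_cases hp : q p <;> simp [hp, ih]

-- ===== VERDICT =====
theorem get_pattern_mode_spec : Claim_equal_get_pattern_mode := by
  intro patterns _hdom hpre
  unfold Spec_get_pattern_mode get_pattern_mode get_pattern_mode_alt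
  have hne : patterns ≠ [] := by
    intro h; subst h; simp [Pre_get_pattern_mode] at hpre
  have hget : ∃ q, PySem.List.pyGet? patterns 1 = some q := by
    have h2 : (1 : Int) < patterns.length := by
      unfold Pre_get_pattern_mode at hpre; omega
    cases patterns with
    | nil => simp at h2
    | cons a t =>
      cases t with
      | nil => simp at h2
      | cons b t' => exact ⟨b, by simp [PySem.List.pyGet?, PySem.List.pyIdx?]⟩
  obtain ⟨q, hq⟩ := hget
  rw [hq]
  simp only
  rw [loopA1_eq 2 patterns 0 hne, loopA2_eq, loopA3_eq, foldB_eq,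
      any_eq_not_isEmpty_filter]
  cases h1 : patterns.all (fun p => (p.2.length : Int) == 2) with
  | true => simp
  | false =>
    cases he : (patterns.filter (fun p => p.2.length == 1)).isEmpty with
    | true => simp
    | false =>
      cases h2 : (patterns.filter (fun p => p.2.length == 1)).all (fun p => p.2.headI == p.1 * 2) with
      | true => simp
      | false =>
        cases h3 : (patterns.filter (fun p => p.2.length == 1)).all (fun p => p.2.headI == p.1 * 2 + 1) <;>
          simp_all
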